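-- pv_equiv track=rewrite | github.com/Danya-Fpnk/diploma | traffic_analyzer.py | calculate_priority
-- ===== SOURCE A (Python) =====
-- def calculate_priority(current_unixtime, objects, priority):
--     total_priority = 0
--     for obj_class, track_ids in objects.items():
--         for track_id, detect_time in track_ids.items():
--             wait_time = current_unixtime - detect_time
--             wait_time_bonus = (wait_time // 5)
--             total_priority += (priority.get(obj_class, 0) + wait_time_bonus)
--     return total_priority
-- ===== SOURCE B (Python) =====
-- def calculate_priority(current_unixtime, objects, priority):
--     class_part = sum(priority.get(obj_class, 0) * len(track_ids)
--                      for obj_class, track_ids in objects.items())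
--     wait_part = sum((current_unixtime - detect_time) // 5
--                     for track_ids in objects.values()
--                     for detect_time in track_ids.values())
--     return class_part + wait_part
-- ===== Notes on version B (the rewrite author's own statement) =====
-- stated objective: alternative
-- what changed: Replaced the single fused nested accumulator loop by two separate aggregations: the class-priority total computed as priority-value times track count per class (no inner scan for that part), plus a separately summed wait-time bonus.
import Mathlib
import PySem

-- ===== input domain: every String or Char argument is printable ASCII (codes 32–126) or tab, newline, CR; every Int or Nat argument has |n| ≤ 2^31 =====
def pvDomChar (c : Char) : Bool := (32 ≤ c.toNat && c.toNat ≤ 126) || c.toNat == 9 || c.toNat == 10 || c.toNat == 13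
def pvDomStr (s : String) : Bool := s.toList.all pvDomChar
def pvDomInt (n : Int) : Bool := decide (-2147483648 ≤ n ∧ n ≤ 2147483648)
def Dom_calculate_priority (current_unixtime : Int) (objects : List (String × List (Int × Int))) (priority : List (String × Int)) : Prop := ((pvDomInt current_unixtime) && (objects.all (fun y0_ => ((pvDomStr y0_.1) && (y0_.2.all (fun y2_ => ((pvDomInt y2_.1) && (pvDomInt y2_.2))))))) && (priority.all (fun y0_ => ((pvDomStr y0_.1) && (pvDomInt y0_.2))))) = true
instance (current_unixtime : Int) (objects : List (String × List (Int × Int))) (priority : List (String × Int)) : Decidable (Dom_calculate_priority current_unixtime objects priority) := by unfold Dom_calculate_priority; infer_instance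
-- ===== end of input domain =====

-- B replaces A's single fused accumulator loop by two separate aggregations (priority×count per class, plus a summed wait-time bonus): an alternative decomposition of the same cost.


-- ===== PORT A =====
-- Port of A: one fused pass, a running accumulator over every (class, track) pair.
def calculate_priority (current_unixtime : Int) (objects : List (String × List (Int × Int))) (priority : List (String × Int)) : Int :=
  objects.foldl (fun total p =>
    p.2.foldl (fun t q =>
      t + (PySem.Dict.getD (PySem.Dict.mk priority) p.1 0 + PySem.Int.floordiv (current_unixtime - q.2) 5)) total) 0

-- ===== PORT B =====
-- Port of B: two separate aggregations — priority×count per class, plus the summed wait-time bonus.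
def calculate_priority_alt (current_unixtime : Int) (objects : List (String × List (Int × Int))) (priority : List (String × Int)) : Int :=
  let class_part := (objects.map (fun p => PySem.Dict.getD (PySem.Dict.mk priority) p.1 0 * (p.2.length : Int))).sum
  let wait_part := (objects.map (fun p => (p.2.map (fun q => PySem.Int.floordiv (current_unixtime - q.2) 5)).sum)).sum
  class_part + wait_part

-- ===== PRECONDITION & SPEC =====
def Spec_calculate_priority (current_unixtime : Int) (objects : List (String × List (Int × Int))) (priority : List (String × Int)) (out : Int) : Prop := out = calculate_priority_alt current_unixtime objects priority
instance (current_unixtime : Int) (objects : List (String × List (Int × Int))) (priority : List (String × Int)) (out : Int) : Decidable (Spec_calculate_priority current_unixtime objects priority out) := by unfold Spec_calculate_priority; infer_instance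

-- ===== CLAIM (what is proved, stated in full; the proofs are below) =====
def Claim_equal_calculate_priority : Prop := ∀ (current_unixtime : Int) (objects : List (String × List (Int × Int))) (priority : List (String × Int)), Dom_calculate_priority current_unixtime objects priority → Spec_calculate_priority current_unixtime objects priority (calculate_priority current_unixtime objects priority)

-- ===== LEMMAS AND PROOFS =====
lemma inner_foldl (c P : Int) (l : List (Int × Int)) (acc : Int) :
    l.foldl (fun t q => t + (P + PySem.Int.floordiv (c - q.2) 5)) acc
      = acc + P * (l.length : Int) + (l.map (fun q => PySem.Int.floordiv (c - q.2) 5)).sum := by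
  induction l generalizing acc with
  | nil => simp
  | cons h t ih =>
      simp only [List.foldl_cons, List.map_cons, List.sum_cons, List.length_cons, ih]
      push_cast; ring

lemma outer_foldl (c : Int) (objects : List (String × List (Int × Int))) (priority : List (String × Int)) (acc : Int) :
    objects.foldl (fun total p =>
      p.2.foldl (fun t q =>
        t + (PySem.Dict.getD (PySem.Dict.mk priority) p.1 0 + PySem.Int.floordiv (c - q.2) 5)) total) acc
    = acc + (objects.map (fun p => PySem.Dict.getD (PySem.Dict.mk priority) p.1 0 * (p.2.length : Int))).sum
        + (objects.map (fun p => (p.2.map (fun q => PySem.Int.floordiv (c - q.2) 5)).sum)).sum := by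
  induction objects generalizing acc with
  | nil => simp
  | cons h t ih =>
      rw [List.foldl_cons, inner_foldl, ih]
      simp only [List.map_cons, List.sum_cons]
      ring

-- ===== VERDICT (by name: the statement is the Claim_ definition above) =====
theorem calculate_priority_spec : Claim_equal_calculate_priority := by
  intro c objects priority _
  unfold Spec_calculate_priority calculate_priority calculate_priority_alt
  rw [outer_foldl]
  ring
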